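-- pv_equiv track=rewrite | github.com/stefnomden/Modular-Curve-Computations | Generate_msymbols+relations.py | generate_M_symbols
-- ===== SOURCE A (Python) =====
-- import math
--
-- def generate_M_symbols(N): #returns a list containing all inequivalent M-symbols for N. The M symbol (c:d) has the form [c,d] in this list.
--   elements = []
--
--   for n in range(1,N+1):                    #create the set of elements where the equivalence is defined.
--     for m in range(1,N+1):
--       if math.gcd(math.gcd(m,n),N) == 1:
--         elements.append([m,n])
--
--   remove = []
--
--   for i in range(0,len(elements)):          #check which elements are equivalent and add them to the elements that are to be removed
--     for j in range(i,len(elements)):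
--       if elements[i][0]*elements[j][1] % N == elements[j][0]*elements[i][1] % N and i != j:
--         remove.append(elements[j])
--
--   for r in remove:    #remove the equivalent elements
--     if r in elements:
--       elements.remove(r)
--
--   return elements
-- ===== SOURCE B (Python) =====
-- import math
--
-- def generate_M_symbols(N):
--     # One pass: keep a candidate (m,n) only if it is not P^1(Z/N)-equivalent
--     # to an already-kept symbol (cross-product test against the short kept list).
--     out = []
--     for n in range(1, N + 1):
--         for m in range(1, N + 1):
--             if math.gcd(math.gcd(m, n), N) == 1:
--                 if all(e[0] * n % N != m * e[1] % N for e in out):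
--                     out.append([m, n])
--     return out
-- ===== Notes on version B (the rewrite author's own statement) =====
-- stated objective: faster
-- what changed: Instead of building all candidates, marking equivalent pairs in an O(len^2) double scan over the candidate list and then removing them pass by pass, B makes one pass over the candidates and keeps (m,n) only if it is not equivalent (same cross-product mod N) to any already-kept symbol, so the inner scan runs over the short kept list of P^1(Z/N) representatives.
import Mathlib
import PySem

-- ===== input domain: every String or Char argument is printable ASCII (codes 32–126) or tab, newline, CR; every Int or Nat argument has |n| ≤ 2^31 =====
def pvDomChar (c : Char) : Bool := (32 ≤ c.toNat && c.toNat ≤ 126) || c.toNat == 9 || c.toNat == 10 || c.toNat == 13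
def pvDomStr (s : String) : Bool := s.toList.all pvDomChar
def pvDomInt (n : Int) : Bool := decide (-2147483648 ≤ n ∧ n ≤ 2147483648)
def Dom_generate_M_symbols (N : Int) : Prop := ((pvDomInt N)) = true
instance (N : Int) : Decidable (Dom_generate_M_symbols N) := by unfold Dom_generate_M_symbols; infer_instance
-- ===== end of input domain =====

-- B replaces A's mark-equivalent-pairs-then-remove passes by a single pass that keeps a
-- candidate only if it is not equivalent to an already-kept P^1(Z/N) representative.

-- ===== PORT A =====
-- elements = [[m,n] for n in range(1,N+1) for m in range(1,N+1) if gcd(gcd(m,n),N)==1]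
def pvAElems (N : Int) : List (List Int) :=
  (PySem.List.pyRange 1 (N+1) 1).foldl (fun acc n =>
    (PySem.List.pyRange 1 (N+1) 1).foldl (fun acc m =>
      if ((Int.gcd (Int.gcd m n : Int) N) == 1) then acc ++ [[m, n]] else acc) acc) []

-- the double index loop building "remove"
def pvARemove (N : Int) (elements : List (List Int)) : List (List Int) :=
  (PySem.List.pyRange 0 (elements.length : Int) 1).foldl (fun rem i =>
    (PySem.List.pyRange i (elements.length : Int) 1).foldl (fun rem j =>
      if (PySem.Int.mod (PySem.List.pyGetD (PySem.List.pyGetD elements i []) 0 0 *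
                         PySem.List.pyGetD (PySem.List.pyGetD elements j []) 1 0) N ==
          PySem.Int.mod (PySem.List.pyGetD (PySem.List.pyGetD elements j []) 0 0 *
                         PySem.List.pyGetD (PySem.List.pyGetD elements i []) 1 0) N) && (i != j)
      then rem ++ [PySem.List.pyGetD elements j []] else rem) rem) []

def generate_M_symbols (N : Int) : List (List Int) :=
  let elements := pvAElems N
  let remove := pvARemove N elements
  remove.foldl (fun els r =>
    if els.contains r then (PySem.List.remove? els r).getD els else els) elements

-- ===== PORT B =====
def generate_M_symbols_alt (N : Int) : List (List Int) :=
  (PySem.List.pyRange 1 (N+1) 1).foldl (fun out n =>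
    (PySem.List.pyRange 1 (N+1) 1).foldl (fun out m =>
      if ((Int.gcd (Int.gcd m n : Int) N) == 1) then
        if out.all (fun e =>
             PySem.Int.mod (PySem.List.pyGetD e 0 0 * n) N !=
             PySem.Int.mod (m * PySem.List.pyGetD e 1 0) N)
        then out ++ [[m, n]] else out
      else out) out) []

-- ===== PRECONDITION & SPEC =====
def Spec_generate_M_symbols (N : Int) (out : List (List Int)) : Prop := out = generate_M_symbols_alt N
instance (N : Int) (out : List (List Int)) : Decidable (Spec_generate_M_symbols N out) := by unfold Spec_generate_M_symbols; infer_instance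

-- ===== CLAIM (what is proved, stated in full; the proofs are below) =====
def Claim_equal_generate_M_symbols : Prop := ∀ (N : Int), Dom_generate_M_symbols N → Spec_generate_M_symbols N (generate_M_symbols N)

-- ===== LEMMAS AND PROOFS =====

-- the P^1 cross-product equivalence test, exactly as both ports spell it
def pvR (N : Int) (y x : List Int) : Bool :=
  PySem.Int.mod (PySem.List.pyGetD y 0 0 * PySem.List.pyGetD x 1 0) N ==
  PySem.Int.mod (PySem.List.pyGetD x 0 0 * PySem.List.pyGetD y 1 0) N

-- the candidate list, flattened
def pvCand (N : Int) : List (List Int) :=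
  (PySem.List.pyRange 1 (N+1) 1).flatMap (fun n =>
    ((PySem.List.pyRange 1 (N+1) 1).filter
        (fun m => (Int.gcd (Int.gcd m n : Int) N) == 1)).map (fun m => [m, n]))

-- B's greedy step
def pvStep (N : Int) (out : List (List Int)) (x : List Int) : List (List Int) :=
  if out.all (fun e => !(pvR N e x)) then out ++ [x] else out

-- keep x iff not equivalent to ANY earlier candidate (A's semantics)
def pvNoE (N : Int) : List (List Int) → List (List Int) → List (List Int)
  | _, [] => []
  | pre, x :: xs =>
    if pre.all (fun y => !(pvR N y x)) then x :: pvNoE N (pre ++ [x]) xs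
    else pvNoE N (pre ++ [x]) xs

-- keep x iff not equivalent to any KEPT element (B's semantics)
def pvGo (N : Int) : List (List Int) → List (List Int) → List (List Int)
  | _, [] => []
  | out, x :: xs =>
    if out.all (fun y => !(pvR N y x)) then x :: pvGo N (out ++ [x]) xs
    else pvGo N out xs

theorem pvGetD_pair_zero (a b d : Int) : PySem.List.pyGetD [a, b] 0 d = a := by
  simp [PySem.List.pyGetD, PySem.List.pyGet?, PySem.List.pyIdx?]

theorem pvGetD_pair_one (a b d : Int) : PySem.List.pyGetD [a, b] 1 d = b := by
  simp [PySem.List.pyGetD, PySem.List.pyGet?, PySem.List.pyIdx?]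

-- fold that conditionally appends = filter+map
theorem pvFoldAppendIf {α β : Type} (l : List α) (acc : List β) (p : α → Bool) (f : α → β) :
    l.foldl (fun a x => if p x then a ++ [f x] else a) acc = acc ++ (l.filter p).map f := by
  induction l generalizing acc with
  | nil => simp
  | cons x xs ih =>
    by_cases h : p x <;> simp [List.foldl_cons, h, ih]

-- fold that appends lists = flatMap
theorem pvFoldAppend {α β : Type} (l : List α) (acc : List β) (g : α → List β) :
    l.foldl (fun a x => a ++ g x) acc = acc ++ l.flatMap g := by
  induction l generalizing acc with
  | nil => simp
  | cons x xs ih => simp [List.foldl_cons, ih]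

-- fold with a filter guard = fold over the filtered+mapped list
theorem pvFoldFilterStep {α β γ : Type} (l : List α) (acc : γ) (p : α → Bool) (f : α → β)
    (s : γ → β → γ) :
    l.foldl (fun a x => if p x then s a (f x) else a) acc = ((l.filter p).map f).foldl s acc := by
  induction l generalizing acc with
  | nil => simp
  | cons x xs ih =>
    by_cases h : p x <;> simp [List.foldl_cons, h, ih]

-- nested fold = fold over flatMap
theorem pvFoldNested {α β γ : Type} (l : List α) (g : α → List β) (acc : γ) (s : γ → β → γ) :
    l.foldl (fun a x => (g x).foldl s a) acc = (l.flatMap g).foldl s acc := by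
  induction l generalizing acc with
  | nil => simp
  | cons x xs ih => simp [List.foldl_cons, ih, List.foldl_append]

-- A's elements = pvCand
theorem pvElements_eq (N : Int) : pvAElems N = pvCand N := by
  unfold pvAElems
  have h : ∀ (n : Int) (acc : List (List Int)),
      (PySem.List.pyRange 1 (N+1) 1).foldl (fun acc m =>
        if ((Int.gcd (Int.gcd m n : Int) N) == 1) then acc ++ [[m, n]] else acc) acc =
      acc ++ ((PySem.List.pyRange 1 (N+1) 1).filter
        (fun m => (Int.gcd (Int.gcd m n : Int) N) == 1)).map (fun m => [m, n]) := by
    intro n acc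
    exact pvFoldAppendIf _ _ _ _
  have hfun : (fun (acc : List (List Int)) (n : Int) =>
      (PySem.List.pyRange 1 (N+1) 1).foldl (fun acc m =>
        if ((Int.gcd (Int.gcd m n : Int) N) == 1) then acc ++ [[m, n]] else acc) acc)
      = fun acc n => acc ++ ((PySem.List.pyRange 1 (N+1) 1).filter
          (fun m => (Int.gcd (Int.gcd m n : Int) N) == 1)).map (fun m => [m, n]) := by
    funext acc n; exact h n acc
  rw [hfun, pvFoldAppend]
  rfl

-- A's remove list as a flatMap over index pairs
theorem pvRemove_eq (N : Int) (elements : List (List Int)) :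
    pvARemove N elements =
    (PySem.List.pyRange 0 (elements.length : Int) 1).flatMap (fun i =>
      ((PySem.List.pyRange i (elements.length : Int) 1).filter (fun j =>
          (pvR N (PySem.List.pyGetD elements i []) (PySem.List.pyGetD elements j [])) && (i != j))).map
        (fun j => PySem.List.pyGetD elements j [])) := by
  unfold pvARemove
  have hfun : (fun (rem : List (List Int)) (i : Int) =>
      (PySem.List.pyRange i (elements.length : Int) 1).foldl (fun rem j =>
        if (PySem.Int.mod (PySem.List.pyGetD (PySem.List.pyGetD elements i []) 0 0 *
                           PySem.List.pyGetD (PySem.List.pyGetD elements j []) 1 0) N ==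
            PySem.Int.mod (PySem.List.pyGetD (PySem.List.pyGetD elements j []) 0 0 *
                           PySem.List.pyGetD (PySem.List.pyGetD elements i []) 1 0) N) && (i != j)
        then rem ++ [PySem.List.pyGetD elements j []] else rem) rem)
      = fun rem i => rem ++
        ((PySem.List.pyRange i (elements.length : Int) 1).filter (fun j =>
          (pvR N (PySem.List.pyGetD elements i []) (PySem.List.pyGetD elements j [])) && (i != j))).map
          (fun j => PySem.List.pyGetD elements j []) := by
    funext rem i
    exact pvFoldAppendIf _ _ _ _
  rw [hfun, pvFoldAppend]
  rfl

-- transitivity of the cross-product test through a unimodular middle element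
theorem pvR_trans (N a0 a1 b0 b1 c0 c1 : Int) (hN : 0 < N)
    (hg : Int.gcd (Int.gcd b0 b1 : Int) N = 1)
    (h1 : PySem.Int.mod (a0 * b1) N = PySem.Int.mod (b0 * a1) N)
    (h2 : PySem.Int.mod (b0 * c1) N = PySem.Int.mod (c0 * b1) N) :
    PySem.Int.mod (a0 * c1) N = PySem.Int.mod (c0 * a1) N := by
  rw [PySem.Int.mod_eq_emod_of_pos hN] at h1 h2 ⊢
  rw [PySem.Int.mod_eq_emod_of_pos hN] at h1 h2 ⊢
  -- Bezout: 1 = b0*x + b1*y + N*z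
  obtain ⟨x, y, z, hxyz⟩ : ∃ x y z : Int, b0 * x + b1 * y + N * z = 1 := by
    refine ⟨Int.gcdA b0 b1 * Int.gcdA (Int.gcd b0 b1 : Int) N,
            Int.gcdB b0 b1 * Int.gcdA (Int.gcd b0 b1 : Int) N,
            Int.gcdB (Int.gcd b0 b1 : Int) N, ?_⟩
    have e1 := Int.gcd_eq_gcd_ab (Int.gcd b0 b1 : Int) N
    have e2 := Int.gcd_eq_gcd_ab b0 b1
    rw [hg] at e1
    push_cast at e1
    linear_combination (-(Int.gcdA (Int.gcd b0 b1 : Int) N)) * e2 - e1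
  set n := N.toNat with hn
  have hNn : (n : Int) = N := Int.toNat_of_nonneg hN.le
  have cast_iff : ∀ a b : Int, (a : ZMod n) = (b : ZMod n) ↔ a % N = b % N := by
    intro a b
    rw [ZMod.intCast_eq_intCast_iff', hNn]
  rw [← cast_iff]
  have H1 : ((a0 * b1 : Int) : ZMod n) = ((b0 * a1 : Int) : ZMod n) := (cast_iff _ _).mpr h1
  have H2 : ((b0 * c1 : Int) : ZMod n) = ((c0 * b1 : Int) : ZMod n) := (cast_iff _ _).mpr h2
  have hN0 : ((N : Int) : ZMod n) = 0 := by
    rw [← hNn]; push_cast; exact ZMod.natCast_self n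
  have HU : (b0 : ZMod n) * (x : ZMod n) + (b1 : ZMod n) * (y : ZMod n) = 1 := by
    have h := congrArg (fun t : Int => (t : ZMod n)) hxyz
    push_cast at h
    rw [hN0] at h
    linear_combination h
  push_cast at H1 H2 ⊢
  linear_combination ((x : ZMod n) * c0 + (y : ZMod n) * c1) * H1 +
    ((x : ZMod n) * a0 + (y : ZMod n) * a1) * H2 - (a0 * c1 - c0 * a1) * HU

-- shape of the candidates
theorem pvCand_mem (N : Int) (x : List Int) (hx : x ∈ pvCand N) :
    ∃ m n : Int, x = [m, n] ∧ 1 ≤ n ∧ n ≤ N ∧ (Int.gcd (Int.gcd m n : Int) N) = 1 := by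
  unfold pvCand at hx
  simp only [List.mem_flatMap, List.mem_map, List.mem_filter,
    PySem.List.mem_pyRange_one, beq_iff_eq] at hx
  obtain ⟨n, ⟨hn1, hn2⟩, m, ⟨_, hm⟩, hxe⟩ := hx
  exact ⟨m, n, hxe.symm, hn1, by omega, hm⟩

-- disjoint union of nodup pieces is nodup
theorem pvNodup_flatMap {α β : Type} [DecidableEq β] (ns : List α) (f : α → List β)
    (hns : ns.Nodup) (hf : ∀ n ∈ ns, (f n).Nodup)
    (hdisj : ∀ a ∈ ns, ∀ b ∈ ns, a ≠ b → ∀ x ∈ f a, x ∉ f b) :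
    (ns.flatMap f).Nodup := by
  induction ns with
  | nil => simp
  | cons n ns ih =>
    rw [List.flatMap_cons]
    apply List.Nodup.append
    · exact hf n (by simp)
    · exact ih hns.of_cons (fun a ha => hf a (by simp [ha]))
        (fun a ha b hb hab => hdisj a (by simp [ha]) b (by simp [hb]) hab)
    · intro x hx hx'
      obtain ⟨b, hb, hxb⟩ := List.mem_flatMap.mp hx'
      have hnb : n ≠ b := by
        rintro rfl
        exact (List.nodup_cons.mp hns).1 hb
      exact hdisj n (by simp) b (by simp [hb]) hnb x hx hxb
  
theorem pvCand_nodup (N : Int) : (pvCand N).Nodup := by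
  unfold pvCand
  apply pvNodup_flatMap
  · exact PySem.List.nodup_pyRange_one 1 (N+1)
  · intro n _
    apply List.Nodup.map
    · intro a b hab
      exact (List.cons_eq_cons.mp hab).1
    · exact (PySem.List.nodup_pyRange_one 1 (N+1)).filter _
  · intro a _ b _ hab x hxa hxb
    simp only [List.mem_map, List.mem_filter] at hxa hxb
    obtain ⟨m, _, rfl⟩ := hxa
    obtain ⟨m', _, h⟩ := hxb
    apply hab
    obtain ⟨h1, h2⟩ := List.cons_eq_cons.mp h
    obtain ⟨h3, -⟩ := List.cons_eq_cons.mp h2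
    exact h3.symm

-- membership in A's remove list
theorem pvMem_rem (N : Int) (x : List Int) :
    x ∈ pvARemove N (pvCand N) ↔
    ∃ i j : Nat, i < j ∧ j < (pvCand N).length ∧
      pvR N ((pvCand N).getD i []) ((pvCand N).getD j []) = true ∧
      x = (pvCand N).getD j [] := by
  rw [pvRemove_eq]
  simp only [List.mem_flatMap, List.mem_map, List.mem_filter,
    PySem.List.mem_pyRange_one, Bool.and_eq_true, bne_iff_ne, ne_eq]
  constructor
  · rintro ⟨i, ⟨h0i, hiL⟩, j, ⟨⟨hij, hjL⟩, hR, hne⟩, rfl⟩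
    have h0j : (0:Int) ≤ j := le_trans h0i hij
    refine ⟨i.toNat, j.toNat, by omega, by omega, ?_, ?_⟩
    · rwa [PySem.List.pyGetD_of_nonneg _ _ h0i, PySem.List.pyGetD_of_nonneg _ _ h0j] at hR
    · rw [PySem.List.pyGetD_of_nonneg _ _ h0j]
  · rintro ⟨i, j, hij, hjL, hR, rfl⟩
    refine ⟨(i : Int), ⟨by omega, by omega⟩, (j : Int), ⟨⟨by omega, by omega⟩, ?_, by omega⟩, ?_⟩
    · rwa [PySem.List.pyGetD_of_nonneg _ _ (by omega), PySem.List.pyGetD_of_nonneg _ _ (by omega),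
        Int.toNat_natCast, Int.toNat_natCast]
    · rw [PySem.List.pyGetD_of_nonneg _ _ (by omega), Int.toNat_natCast]

-- under Nodup, x (at index pre.length) is in remove iff some earlier candidate matches it
theorem pvGetD_append_self {α : Type} (x d : α) : ∀ (p t : List α), (p ++ x :: t).getD p.length d = x := by
  intro p t
  induction p with
  | nil => rfl
  | cons a p ih => simp

theorem pvGetD_append_left {α : Type} (d : α) : ∀ (p t : List α) (i : Nat), i < p.length →
    (p ++ t).getD i d = p.getD i d := by
  intro p t i h
  rw [List.getD_eq_getElem _ _ (by simp; omega), List.getD_eq_getElem _ _ h,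
    List.getElem_append_left h]

-- under Nodup, x (at index pre.length) is in remove iff some earlier candidate matches it
theorem pvMem_rem_iff_pre (N : Int) (pre xs : List (List Int)) (x : List Int)
    (hsplit : pre ++ x :: xs = pvCand N) :
    x ∈ pvARemove N (pvCand N) ↔ ∃ y ∈ pre, pvR N y x = true := by
  have hnd : (pvCand N).Nodup := pvCand_nodup N
  have hlen : pre.length < (pvCand N).length := by
    rw [← hsplit]; simp
  have hxat : (pvCand N).getD pre.length [] = x := by
    rw [← hsplit]; exact pvGetD_append_self x [] pre xs
  have hgetpre : ∀ (i : Nat), i < pre.length → (pvCand N).getD i [] = pre.getD i [] := by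
    intro i h
    rw [← hsplit]
    exact pvGetD_append_left [] pre (x :: xs) i h
  rw [pvMem_rem]
  constructor
  · rintro ⟨i, j, hij, hjL, hR, rfl⟩
    have h2 : (pvCand N)[pre.length]'hlen = (pvCand N)[j]'hjL := by
      rw [← List.getD_eq_getElem _ ([] : List Int) hlen, ← List.getD_eq_getElem _ ([] : List Int) hjL]
      exact hxat
    have hj : pre.length = j := (hnd.getElem_inj_iff).mp h2
    subst hj
    have hiL : i < pre.length := hij
    refine ⟨pre.getD i [], ?_, ?_⟩
    · rw [List.getD_eq_getElem _ _ hiL]; exact List.getElem_mem _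
    · rwa [hgetpre i hiL] at hR
  · rintro ⟨y, hy, hR⟩
    obtain ⟨i, hiL, rfl⟩ := List.mem_iff_getElem.mp hy
    refine ⟨i, pre.length, hiL, hlen, ?_, hxat.symm⟩
    rw [hgetpre i hiL, hxat, List.getD_eq_getElem _ _ hiL]
    exact hR

-- the erase-fold over remove = filter, for a Nodup base list
theorem pvEraseFold (rs : List (List Int)) : ∀ (l : List (List Int)), l.Nodup →
    rs.foldl (fun a r => a.erase r) l = l.filter (fun x => !(rs.contains x)) := by
  induction rs with
  | nil => intro l _; simp
  | cons r rs ih =>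
    intro l hl
    rw [List.foldl_cons, ih _ (hl.erase r), hl.erase_eq_filter r, List.filter_filter]
    congr 1
    funext y
    by_cases hyr : y = r <;> simp [hyr, Bool.and_comm]

-- A's final loop's step is erase
theorem pvStepErase :
    (fun (els : List (List Int)) r =>
      if els.contains r then (PySem.List.remove? els r).getD els else els) =
    fun els r => els.erase r := by
  funext els r
  by_cases h : els.contains r
  · have hm : r ∈ els := by simpa using h
    rw [if_pos h, PySem.List.remove?_eq_some_erase _ _ hm]
    rfl
  · have hm : r ∉ els := by simpa using h
    rw [if_neg h, List.erase_of_not_mem hm]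

-- a Bool helper: the all-test fails iff some element matches
theorem pvAllFalse (N : Int) (x : List Int) (ws : List (List Int)) :
    ws.all (fun y => !(pvR N y x)) = false ↔ ∃ z ∈ ws, pvR N z x = true := by
  rw [Bool.eq_false_iff]
  simp [List.all_eq_true]

-- A = keep-if-no-earlier-equivalent
theorem pvFilter_eq_noE (N : Int) : ∀ (l pre : List (List Int)),
    pre ++ l = pvCand N →
    l.filter (fun x => !((pvARemove N (pvCand N)).contains x)) = pvNoE N pre l := by
  intro l
  induction l with
  | nil => intro pre _; simp [pvNoE]
  | cons x xs ih =>
    intro pre hsplit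
    have hiff := pvMem_rem_iff_pre N pre xs x hsplit
    have hrec := ih (pre ++ [x]) (by simpa using hsplit)
    rw [List.filter_cons, pvNoE]
    rcases Bool.eq_false_or_eq_true (pre.all (fun y => !(pvR N y x))) with hp | hp
    · have hx : x ∉ pvARemove N (pvCand N) := by
        intro hx
        have := (pvAllFalse N x pre).mpr (hiff.mp hx)
        rw [hp] at this
        simp at this
      have hcx : ((pvARemove N (pvCand N)).contains x) = false := by simp [hx]
      rw [hp, hcx]
      simpa using hrec
    · have hx : x ∈ pvARemove N (pvCand N) := hiff.mpr ((pvAllFalse N x pre).mp hp)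
      have hcx : ((pvARemove N (pvCand N)).contains x) = true := by simp [hx]
      rw [hp, hcx]
      simpa using hrec

-- noE = greedy go (the kept list always holds a representative of every scanned candidate)
theorem pvNoE_eq_go (N : Int) : ∀ (l pre out : List (List Int)),
    (∀ z ∈ out, z ∈ pre) →
    (∀ y ∈ pre, ∃ z ∈ out, pvR N z y = true) →
    (∀ y ∈ pre, y ∈ pvCand N) →
    (∀ y ∈ l, y ∈ pvCand N) →
    pvNoE N pre l = pvGo N out l := by
  intro l
  induction l with
  | nil => intro pre out _ _ _ _; rfl
  | cons x xs ih =>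
    intro pre out hsub hrep hC hlC
    have hiff : (∃ y ∈ pre, pvR N y x = true) ↔ (∃ z ∈ out, pvR N z x = true) := by
      constructor
      · rintro ⟨y, hy, hR⟩
        obtain ⟨z, hz, hzy⟩ := hrep y hy
        obtain ⟨b0, b1, rfl, hb1, hbN, hg⟩ := pvCand_mem N y (hC y hy)
        refine ⟨z, hz, ?_⟩
        simp only [pvR, pvGetD_pair_zero, pvGetD_pair_one, beq_iff_eq] at hzy hR ⊢
        exact pvR_trans N _ _ b0 b1 _ _ (by omega) hg hzy hR
      · rintro ⟨z, hz, hR⟩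
        exact ⟨z, hsub z hz, hR⟩
    have hcond : pre.all (fun y => !(pvR N y x)) = out.all (fun y => !(pvR N y x)) := by
      rcases Bool.eq_false_or_eq_true (pre.all (fun y => !(pvR N y x))) with hp | hp <;>
        rcases Bool.eq_false_or_eq_true (out.all (fun y => !(pvR N y x))) with ho | ho
      · rw [hp, ho]
      · exfalso
        obtain ⟨y, hy, hR⟩ := hiff.mpr ((pvAllFalse N x out).mp ho)
        have := (pvAllFalse N x pre).mpr ⟨y, hy, hR⟩
        rw [hp] at this
        simp at this
      · exfalso
        obtain ⟨z, hz, hR⟩ := hiff.mp ((pvAllFalse N x pre).mp hp)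
        have := (pvAllFalse N x out).mpr ⟨z, hz, hR⟩
        rw [ho] at this
        simp at this
      · rw [hp, ho]
    rw [pvNoE, pvGo, hcond]
    by_cases hc : out.all (fun y => !(pvR N y x)) = true
    · rw [if_pos hc, if_pos hc]
      congr 1
      apply ih
      · intro z hz
        rcases List.mem_append.mp hz with h | h
        · exact List.mem_append_left _ (hsub z h)
        · exact List.mem_append_right _ h
      · intro y hy
        rcases List.mem_append.mp hy with h | h
        · obtain ⟨z, hz, hR⟩ := hrep y h
          exact ⟨z, List.mem_append_left _ hz, hR⟩
        · have hyx : y = x := by simpa using h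
          refine ⟨x, List.mem_append_right _ (by simp), ?_⟩
          rw [hyx]
          simp [pvR]
      · intro y hy
        rcases List.mem_append.mp hy with h | h
        · exact hC y h
        · have hyx : y = x := by simpa using h
          rw [hyx]
          exact hlC x (by simp)
      · intro y hy
        exact hlC y (by simp [hy])
    · rw [if_neg hc, if_neg hc]
      apply ih
      · intro z hz
        exact List.mem_append_left _ (hsub z hz)
      · intro y hy
        rcases List.mem_append.mp hy with h | h
        · exact hrep y h
        · have hyx : y = x := by simpa using h
          rw [hyx]
          exact (pvAllFalse N x out).mp (Bool.eq_false_iff.mpr hc)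
      · intro y hy
        rcases List.mem_append.mp hy with h | h
        · exact hC y h
        · have hyx : y = x := by simpa using h
          rw [hyx]
          exact hlC x (by simp)
      · intro y hy
        exact hlC y (by simp [hy])

-- B's fold unrolled to pvGo
theorem pvFoldl_eq_go (N : Int) : ∀ (l out : List (List Int)),
    l.foldl (pvStep N) out = out ++ pvGo N out l := by
  intro l
  induction l with
  | nil => intro out; simp [pvGo]
  | cons x xs ih =>
    intro out
    rw [List.foldl_cons, pvGo]
    by_cases hc : out.all (fun y => !(pvR N y x)) = true
    · rw [show pvStep N out x = out ++ [x] from by unfold pvStep; rw [if_pos hc]]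
      rw [ih, if_pos hc]
      simp
    · rw [show pvStep N out x = out from by unfold pvStep; rw [if_neg hc]]
      rw [ih, if_neg hc]

-- B = fold of pvStep over pvCand
theorem pvB_eq (N : Int) : generate_M_symbols_alt N = (pvCand N).foldl (pvStep N) [] := by
  unfold generate_M_symbols_alt
  have hbody : ∀ n : Int, (fun (a : List (List Int)) (m : Int) =>
      if ((Int.gcd (Int.gcd m n : Int) N) == 1) then
        if a.all (fun e =>
             PySem.Int.mod (PySem.List.pyGetD e 0 0 * n) N !=
             PySem.Int.mod (m * PySem.List.pyGetD e 1 0) N)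
        then a ++ [[m, n]] else a
      else a) =
      fun a m => if ((Int.gcd (Int.gcd m n : Int) N) == 1) then pvStep N a [m, n] else a := by
    intro n
    funext a m
    unfold pvStep
    simp only [pvR, pvGetD_pair_zero, pvGetD_pair_one]
    rfl
  have hfun : (fun (out : List (List Int)) (n : Int) =>
      (PySem.List.pyRange 1 (N+1) 1).foldl (fun out m =>
        if ((Int.gcd (Int.gcd m n : Int) N) == 1) then
          if out.all (fun e =>
               PySem.Int.mod (PySem.List.pyGetD e 0 0 * n) N !=
               PySem.Int.mod (m * PySem.List.pyGetD e 1 0) N)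
          then out ++ [[m, n]] else out
        else out) out) =
      fun out n =>
        (((PySem.List.pyRange 1 (N+1) 1).filter
          (fun m => (Int.gcd (Int.gcd m n : Int) N) == 1)).map (fun m => [m, n])).foldl
          (pvStep N) out := by
    funext out n
    rw [hbody n]
    exact pvFoldFilterStep _ _ _ _ _
  rw [hfun, pvFoldNested]
  rfl

-- the assembled equivalence
theorem pvMain (N : Int) : generate_M_symbols N = generate_M_symbols_alt N := by
  have hA : generate_M_symbols N =
      (pvARemove N (pvCand N)).foldl (fun a r => a.erase r) (pvCand N) := by
    show (pvARemove N (pvAElems N)).foldl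
      (fun els r => if els.contains r then (PySem.List.remove? els r).getD els else els)
      (pvAElems N) = _
    rw [pvElements_eq, pvStepErase]
  rw [hA, pvEraseFold _ _ (pvCand_nodup N), pvFilter_eq_noE N (pvCand N) [] (by simp),
    pvNoE_eq_go N (pvCand N) [] [] (by simp) (by simp) (by simp) (fun y hy => hy), pvB_eq N,
    pvFoldl_eq_go N]
  simp

-- ===== VERDICT (by name: the statement is the Claim_ definition above) =====
theorem generate_M_symbols_spec : Claim_equal_generate_M_symbols := by
  intro N _
  unfold Spec_generate_M_symbols
  exact pvMain N
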